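-- pv_equiv track=rewrite | github.com/blibilijojo/Modpack-Localizer | core/extractor.py | _match_github_version
-- ===== SOURCE A (Python) =====
-- from typing import Dict, List, Optional, Set, Tuple
--
-- def _match_github_version(game_version: str, loaders: str, github_versions: List[str]) -> str:
--     """匹配最适合的GitHub版本号
--
--     Args:
--         game_version: 当前游戏版本，如 "1.20.1"
--         loaders: 当前加载器，如 "forge"
--         github_versions: GitHub版本列表，如 ["1.12.2", "1.16-fabric", "1.16"]
--
--     Returns:
--         最匹配的GitHub版本号
--     """
--     if not github_versions:
--         return ""
--
--     # 解析游戏版本，提取主版本号（如 1.20.1 -> 1.20）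
--     def get_main_version(version: str) -> str:
--         parts = version.split('.')
--         if len(parts) >= 2:
--             return f"{parts[0]}.{parts[1]}"
--         return version
--
--     # 解析GitHub版本，提取版本号和加载器
--     version_info = []
--     for gh_version in github_versions:
--         if '-' in gh_version:
--             v, l = gh_version.rsplit('-', 1)
--             version_info.append((v, l, gh_version))
--         else:
--             version_info.append((gh_version, '', gh_version))
--
--     main_game_version = get_main_version(game_version)
--
--     # 优先匹配加载器和主版本号
--     for v, l, full_version in version_info:
--         if v == main_game_version and l == loaders:
--             return full_version
--
--     # 匹配主版本号（优先选择没有指定加载器的版本）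
--     for v, l, full_version in version_info:
--         if v == main_game_version and l == "":
--             return full_version
--     # 如果没有无加载器版本，再选择有加载器的版本
--     for v, l, full_version in version_info:
--         if v == main_game_version:
--             return full_version
--
--     # 解析版本号为数字元组，用于比较
--     def version_to_tuple(version: str) -> tuple:
--         try:
--             parts = version.split('.')
--             return tuple(int(p) for p in parts if p.isdigit())
--         except:
--             return ()
--
--     # 计算版本号之间的差异
--     def version_diff(v1: str, v2: str) -> int:
--         t1 = version_to_tuple(v1)
--         t2 = version_to_tuple(v2)
--         # 取较短的长度进行比较
--         min_len = min(len(t1), len(t2))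
--         for i in range(min_len):
--             if t1[i] != t2[i]:
--                 return abs(t1[i] - t2[i])
--         # 如果前面的部分相同，返回长度差异
--         return abs(len(t1) - len(t2))
--
--     # 按版本号差异排序，优先选择没有指定加载器的版本
--     version_info.sort(key=lambda x: (version_diff(main_game_version, x[0]), 0 if x[1] == "" else 1))
--
--     return version_info[0][2] if version_info else ""
-- ===== SOURCE B (Python) =====
-- from typing import List
--
-- def _match_github_version(game_version: str, loaders: str, github_versions: List[str]) -> str:
--     """Pick the best-matching GitHub version in one stable pass: each candidate
--     gets a composite priority key and min() (first-minimal) selects the winner."""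
--     if not github_versions:
--         return ""
--
--     parts = game_version.split('.')
--     main = f"{parts[0]}.{parts[1]}" if len(parts) >= 2 else game_version
--
--     def version_to_tuple(version: str) -> tuple:
--         return tuple(int(p) for p in version.split('.') if p.isdigit())
--
--     def version_diff(v1: str, v2: str) -> int:
--         t1 = version_to_tuple(v1)
--         t2 = version_to_tuple(v2)
--         for a, b in zip(t1, t2):
--             if a != b:
--                 return abs(a - b)
--         return abs(len(t1) - len(t2))
--
--     def priority(gh: str) -> tuple:
--         if '-' in gh:
--             v, l = gh.rsplit('-', 1)
--         else:
--             v, l = gh, ''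
--         if v == main and l == loaders:
--             return (0, 0, 0)
--         if v == main and l == '':
--             return (1, 0, 0)
--         if v == main:
--             return (2, 0, 0)
--         return (3, version_diff(main, v), 0 if l == '' else 1)
--
--     return min(github_versions, key=priority)
-- ===== Notes on version B (the rewrite author's own statement) =====
-- stated objective: simpler
-- what changed: A runs three sequential scans over the parsed list and then a full stable sort for the fallback; B assigns every candidate one composite priority key (tier, version-diff, loader-flag) and picks the first minimum in a single stable min() pass.
import Mathlib
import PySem

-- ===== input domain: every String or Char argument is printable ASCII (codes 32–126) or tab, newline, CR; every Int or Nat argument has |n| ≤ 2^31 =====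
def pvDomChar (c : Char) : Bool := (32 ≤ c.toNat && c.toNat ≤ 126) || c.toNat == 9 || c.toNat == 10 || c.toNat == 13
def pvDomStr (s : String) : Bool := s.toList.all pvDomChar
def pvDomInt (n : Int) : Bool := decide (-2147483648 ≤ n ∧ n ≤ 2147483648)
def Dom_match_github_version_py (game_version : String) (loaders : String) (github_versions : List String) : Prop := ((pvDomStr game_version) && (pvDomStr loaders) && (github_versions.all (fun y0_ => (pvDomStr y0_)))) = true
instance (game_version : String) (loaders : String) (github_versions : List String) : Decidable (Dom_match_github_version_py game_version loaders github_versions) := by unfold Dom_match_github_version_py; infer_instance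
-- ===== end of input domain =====

-- B replaces A's three sequential scans plus sort-fallback by a single stable
-- min() pass over one composite priority key (simpler decomposition, same values).

-- ===== PORT A =====
-- shared helpers: identical helper code in both Pythons (get_main_version,
-- version_to_tuple, version_diff, and the '-'-rsplit parse)

-- get_main_version: "1.20.1" -> "1.20"
def pvGetMain (cs : List Char) : List Char :=
  match PySem.Chars.splitOn cs ['.'] with
  | p0 :: p1 :: _ => p0 ++ '.' :: p1
  | _ => cs

-- version_to_tuple: int(p) for the dot-parts that are all-digit (ofChars? is
-- some on every such part, so the .getD 0 default is never taken)
def pvVersionToTuple (cs : List Char) : List Int :=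
  ((PySem.Chars.splitOn cs ['.']).filter PySem.Chars.strIsdigit).map
    (fun p => (PySem.Int.ofChars? p).getD 0)

-- version_diff's scan over range(min_len) as structural recursion on the pair
def pvDiffAux : List Int → List Int → Int
  | a :: as_, b :: bs => if a ≠ b then ((a - b).natAbs : Int) else pvDiffAux as_ bs
  | as_, bs => (((as_.length : Int) - (bs.length : Int)).natAbs : Int)

def pvVersionDiff (v1 v2 : List Char) : Int :=
  pvDiffAux (pvVersionToTuple v1) (pvVersionToTuple v2)

-- gh.rsplit('-', 1): exact (hand port) when '-' occurs in gh
def pvRsplitDash (cs : List Char) : List Char × List Char :=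
  let r := cs.reverse
  (((r.dropWhile (· ≠ '-')).drop 1).reverse, (r.takeWhile (· ≠ '-')).reverse)

-- one element of A's version_info list: (v, l, full)
def pvParse (gh : String) : List Char × List Char × String :=
  if PySem.Str.isIn "-" gh then
    let p := pvRsplitDash gh.toList
    (p.1, p.2, gh)
  else (gh.toList, [], gh)

def match_github_version_py (game_version : String) (loaders : String) (github_versions : List String) : String :=
  if github_versions.isEmpty then "" else
  let version_info := github_versions.map pvParse
  let main := pvGetMain game_version.toList
  let L := loaders.toList
  match version_info.find? (fun t => t.1 == main && t.2.1 == L) with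
  | some t => t.2.2
  | none =>
    match version_info.find? (fun t => t.1 == main && t.2.1 == ([] : List Char)) with
    | some t => t.2.2
    | none =>
      match version_info.find? (fun t => t.1 == main) with
      | some t => t.2.2
      | none =>
        match PySem.List.sorted2 version_info
            (fun t => pvVersionDiff main t.1)
            (fun t => if t.2.1 == ([] : List Char) then (0 : Nat) else 1) with
        | t :: _ => t.2.2
        | [] => ""

-- ===== PORT B =====
-- priority of a parsed candidate (v, l): the composite key of Source B
def pvKeyVL (main L v l : List Char) : Nat × Int × Nat :=
  if v == main && l == L then (0, 0, 0)
  else if v == main && l == ([] : List Char) then (1, 0, 0)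
  else if v == main then (2, 0, 0)
  else (3, pvVersionDiff main v, if l == ([] : List Char) then (0 : Nat) else 1)

def pvPriority (main L : List Char) (gh : String) : Nat × Int × Nat :=
  if PySem.Str.isIn "-" gh then
    let p := pvRsplitDash gh.toList
    pvKeyVL main L p.1 p.2
  else pvKeyVL main L gh.toList []

-- Python tuple '<' on the key triples (lexicographic)
def pvLt3 (a b : Nat × Int × Nat) : Bool :=
  a.1 < b.1 || (a.1 == b.1 && (a.2.1 < b.2.1 || (a.2.1 == b.2.1 && a.2.2 < b.2.2)))

-- min(github_versions, key=priority): first-minimal left fold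
def match_github_version_py_alt (game_version : String) (loaders : String) (github_versions : List String) : String :=
  match github_versions with
  | [] => ""
  | h :: t =>
    let main := pvGetMain game_version.toList
    let L := loaders.toList
    t.foldl (fun best gh =>
      if pvLt3 (pvPriority main L gh) (pvPriority main L best) then gh else best) h
-- ===== PRECONDITION & SPEC =====
def Spec_match_github_version_py (game_version : String) (loaders : String) (github_versions : List String) (out : String) : Prop := out = match_github_version_py_alt game_version loaders github_versions
instance (game_version : String) (loaders : String) (github_versions : List String) (out : String) : Decidable (Spec_match_github_version_py game_version loaders github_versions out) := by unfold Spec_match_github_version_py; infer_instance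

-- ===== CLAIM (what is proved, stated in full; the proofs are below) =====
def Claim_equal_match_github_version_py : Prop := ∀ (game_version : String) (loaders : String) (github_versions : List String), Dom_match_github_version_py game_version loaders github_versions → Spec_match_github_version_py game_version loaders github_versions (match_github_version_py game_version loaders github_versions)

-- ===== LEMMAS AND PROOFS =====

-- the key of a parsed triple, and the first-minimal pairwise step on triples
def keyT (main L : List Char) (t : List Char × List Char × String) : Nat × Int × Nat :=
  pvKeyVL main L t.1 t.2.1

def fT (main L : List Char) (b x : List Char × List Char × String) :
    List Char × List Char × String :=
  if pvLt3 (keyT main L x) (keyT main L b) then x else b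

-- A's four-stage body on the parsed list
def Achain (main L : List Char) (info : List (List Char × List Char × String)) : String :=
  match info.find? (fun t => t.1 == main && t.2.1 == L) with
  | some t => t.2.2
  | none =>
    match info.find? (fun t => t.1 == main && t.2.1 == ([] : List Char)) with
    | some t => t.2.2
    | none =>
      match info.find? (fun t => t.1 == main) with
      | some t => t.2.2
      | none =>
        match PySem.List.sorted2 info
            (fun t => pvVersionDiff main t.1)
            (fun t => if t.2.1 == ([] : List Char) then (0 : Nat) else 1) with
        | t :: _ => t.2.2
        | [] => ""

theorem parse_full (gh : String) : (pvParse gh).2.2 = gh := by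
  unfold pvParse; split <;> rfl

theorem priority_eq_keyT (main L : List Char) (gh : String) :
    pvPriority main L gh = keyT main L (pvParse gh) := by
  unfold pvPriority pvParse keyT; split <;> rfl

theorem keyT_q0 (main L : List Char) (t : List Char × List Char × String)
    (h : (t.1 == main && t.2.1 == L) = true) : keyT main L t = (0, 0, 0) := by
  unfold keyT pvKeyVL; simp [h]

theorem keyT_q3 (main L : List Char) (t : List Char × List Char × String)
    (h2 : (t.1 == main) = false) :
    keyT main L t =
      (3, pvVersionDiff main t.1, if t.2.1 == ([] : List Char) then (0 : Nat) else 1) := by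
  unfold keyT pvKeyVL; simp [h2]

-- the first component of a key is 0 only via the tier-0 branch
theorem keyT_fst (main L : List Char) (t : List Char × List Char × String) :
    keyT main L t = (0,0,0) ∨ keyT main L t = (1,0,0) ∨ keyT main L t = (2,0,0) ∨
      (keyT main L t).1 = 3 := by
  unfold keyT pvKeyVL; split_ifs <;> simp

theorem lt3_zero_right (main L : List Char) (x : List Char × List Char × String) :
    pvLt3 (keyT main L x) (0, 0, 0) = false := by
  rcases keyT_fst main L x with h | h | h | h <;>
    · rcases hk : keyT main L x with ⟨a, b, c⟩
      rw [hk] at h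
      simp_all [pvLt3]

-- head of the insertion-sort fold is the first-minimal fold
theorem head_insert_fold {α : Type} (before : α → α → Bool) :
    ∀ (t : List α) (h : α) (s : List α),
      (t.foldl (fun acc x => PySem.List.insertBy before x acc) (h :: s)).head? =
        some (t.foldl (fun b x => if before x b then x else b) h) := by
  intro t
  induction t with
  | nil => intro h s; rfl
  | cons x t ih =>
    intro h s
    by_cases hb : before x h
    · simpa [PySem.List.insertBy, hb] using ih x (h :: s)
    · simpa [PySem.List.insertBy, hb] using ih h (PySem.List.insertBy before x s)

theorem sorted2_cons_head (main : List Char)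
    (h : List Char × List Char × String) (t : List (List Char × List Char × String)) :
    (PySem.List.sorted2 (h :: t)
        (fun t => pvVersionDiff main t.1)
        (fun t => if t.2.1 == ([] : List Char) then (0 : Nat) else 1)).head? =
      some (t.foldl (fun b x =>
        if (decide (pvVersionDiff main x.1 < pvVersionDiff main b.1) ||
            (!decide (pvVersionDiff main b.1 < pvVersionDiff main x.1) &&
              decide ((if x.2.1 == ([] : List Char) then (0 : Nat) else 1) <
                      (if b.2.1 == ([] : List Char) then (0 : Nat) else 1))))
        then x else b) h) := by
  unfold PySem.List.sorted2
  simp only [List.foldl_cons, PySem.List.insertBy]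
  exact head_insert_fold _ t h []

-- pvLt3 on two tier-3 keys is exactly the sorted2 'before' on (diff, flag)
theorem lt3_three (dx dh : Int) (fx fh : Nat) :
    pvLt3 (3, dx, fx) (3, dh, fh) =
      (decide (dx < dh) || (!decide (dh < dx) && decide (fx < fh))) := by
  rw [Bool.eq_iff_iff]
  simp [pvLt3]
  omega

-- pairwise-min facts: which of {h, x} survives fT at each stage of A's chain
theorem fT_s0x (main L : List Char) (h x : List Char × List Char × String)
    (h0h : (h.1 == main && h.2.1 == L) = false)
    (h0x : (x.1 == main && x.2.1 == L) = true) : fT main L h x = x := by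
  unfold fT keyT pvKeyVL; split_ifs <;> simp_all [pvLt3]

theorem fT_s1h (main L : List Char) (h x : List Char × List Char × String)
    (h0h : (h.1 == main && h.2.1 == L) = false)
    (h1h : (h.1 == main && h.2.1 == ([] : List Char)) = true)
    (h0x : (x.1 == main && x.2.1 == L) = false) : fT main L h x = h := by
  unfold fT keyT pvKeyVL; split_ifs <;> simp_all [pvLt3]

theorem fT_s1x (main L : List Char) (h x : List Char × List Char × String)
    (h0h : (h.1 == main && h.2.1 == L) = false)
    (h1h : (h.1 == main && h.2.1 == ([] : List Char)) = false)
    (h0x : (x.1 == main && x.2.1 == L) = false)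
    (h1x : (x.1 == main && x.2.1 == ([] : List Char)) = true) : fT main L h x = x := by
  unfold fT keyT pvKeyVL; split_ifs <;> simp_all [pvLt3]

theorem fT_s2h (main L : List Char) (h x : List Char × List Char × String)
    (h0h : (h.1 == main && h.2.1 == L) = false)
    (h1h : (h.1 == main && h.2.1 == ([] : List Char)) = false)
    (h2h : (h.1 == main) = true)
    (h0x : (x.1 == main && x.2.1 == L) = false)
    (h1x : (x.1 == main && x.2.1 == ([] : List Char)) = false) : fT main L h x = h := by
  unfold fT keyT pvKeyVL; split_ifs <;> simp_all [pvLt3]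

theorem fT_s2x (main L : List Char) (h x : List Char × List Char × String)
    (h2h : (h.1 == main) = false)
    (h0x : (x.1 == main && x.2.1 == L) = false)
    (h1x : (x.1 == main && x.2.1 == ([] : List Char)) = false)
    (h2x : (x.1 == main) = true) : fT main L h x = x := by
  unfold fT keyT pvKeyVL; split_ifs <;> simp_all [pvLt3]

theorem sorted2_singleton (main : List Char) (h : List Char × List Char × String) :
    PySem.List.sorted2 [h]
      (fun t => pvVersionDiff main t.1)
      (fun t => if t.2.1 == ([] : List Char) then (0 : Nat) else 1) = [h] := rfl

-- one pairwise-min step: dropping the loser of {h, x} leaves A's chain unchanged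
theorem chain_eq (main L : List Char) :
    ∀ (t : List (List Char × List Char × String)) (h : List Char × List Char × String),
      Achain main L (h :: t) = (t.foldl (fT main L) h).2.2 := by
  intro t
  induction t with
  | nil =>
    intro h
    unfold Achain
    simp only [List.find?_cons, List.find?_nil, sorted2_singleton]
    cases (h.1 == main && h.2.1 == L) <;>
      cases (h.1 == main && h.2.1 == ([] : List Char)) <;>
        cases (h.1 == main) <;> rfl
  | cons x t ih =>
    intro h
    rw [List.foldl_cons, ← ih (fT main L h x)]
    by_cases h0h : (h.1 == main && h.2.1 == L) = true
    · have hfx : fT main L h x = h := by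
        unfold fT
        rw [keyT_q0 main L h h0h, lt3_zero_right]
        simp
      rw [hfx]
      unfold Achain
      simp only [List.find?_cons, h0h]
    · replace h0h : (h.1 == main && h.2.1 == L) = false := by simpa using h0h
      by_cases h0x : (x.1 == main && x.2.1 == L) = true
      · rw [fT_s0x main L h x h0h h0x]
        unfold Achain
        simp only [List.find?_cons, h0h, h0x]
      · replace h0x : (x.1 == main && x.2.1 == L) = false := by simpa using h0x
        have hfhx : fT main L h x = x ∨ fT main L h x = h := by
          unfold fT; split <;> simp
        have h0f : ((fT main L h x).1 == main && (fT main L h x).2.1 == L) = false := by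
          rcases hfhx with e | e <;> rw [e] <;> assumption
        unfold Achain
        simp only [List.find?_cons, h0h, h0x, h0f]
        cases hf0 : t.find? (fun t => t.1 == main && t.2.1 == L) with
        | some u => rfl
        | none =>
          simp only []
          -- stage 1
          by_cases h1h : (h.1 == main && h.2.1 == ([] : List Char)) = true
          · rw [fT_s1h main L h x h0h h1h h0x]
            simp only [h1h]
          · replace h1h : (h.1 == main && h.2.1 == ([] : List Char)) = false := by simpa using h1h
            by_cases h1x : (x.1 == main && x.2.1 == ([] : List Char)) = true
            · rw [fT_s1x main L h x h0h h1h h0x h1x]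
              simp only [h1h, h1x]
            · replace h1x : (x.1 == main && x.2.1 == ([] : List Char)) = false := by simpa using h1x
              have h1f : ((fT main L h x).1 == main && (fT main L h x).2.1 == ([] : List Char)) = false := by
                rcases hfhx with e | e <;> rw [e] <;> assumption
              simp only [h1h, h1x, h1f]
              cases hf1 : t.find? (fun t => t.1 == main && t.2.1 == ([] : List Char)) with
              | some u => rfl
              | none =>
                simp only []
                -- stage 2
                by_cases h2h : (h.1 == main) = true
                · rw [fT_s2h main L h x h0h h1h h2h h0x h1x]
                  simp only [h2h]
                · replace h2h : (h.1 == main) = false := by simpa using h2h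
                  by_cases h2x : (x.1 == main) = true
                  · rw [fT_s2x main L h x h2h h0x h1x h2x]
                    simp only [h2h, h2x]
                  · replace h2x : (x.1 == main) = false := by simpa using h2x
                    have h2f : ((fT main L h x).1 == main) = false := by
                      rcases hfhx with e | e <;> rw [e] <;> assumption
                    simp only [h2h, h2x, h2f]
                    cases hf2 : t.find? (fun t => t.1 == main) with
                    | some u => rfl
                    | none =>
                      simp only []
                      -- stage 3: both h and x are tier 3; the head of the stable
                      -- sort is the first-minimal fold under sorted2's 'before'
                      have hbmin : (if (decide (pvVersionDiff main x.1 < pvVersionDiff main h.1) ||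
                              (!decide (pvVersionDiff main h.1 < pvVersionDiff main x.1) &&
                                decide ((if x.2.1 == ([] : List Char) then (0 : Nat) else 1) <
                                        (if h.2.1 == ([] : List Char) then (0 : Nat) else 1))))
                          then x else h) = fT main L h x := by
                        unfold fT
                        rw [keyT_q3 main L x h2x, keyT_q3 main L h h2h, lt3_three]
                      have hL := sorted2_cons_head main h (x :: t)
                      rw [List.foldl_cons] at hL
                      rw [hbmin] at hL
                      have hR := sorted2_cons_head main (fT main L h x) t
                      cases EL : PySem.List.sorted2 (h :: x :: t)
                          (fun t => pvVersionDiff main t.1)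
                          (fun t => if t.2.1 == ([] : List Char) then (0 : Nat) else 1) with
                      | nil => rw [EL] at hL; simp at hL
                      | cons a restL =>
                        cases ER : PySem.List.sorted2 (fT main L h x :: t)
                            (fun t => pvVersionDiff main t.1)
                            (fun t => if t.2.1 == ([] : List Char) then (0 : Nat) else 1) with
                        | nil => rw [ER] at hR; simp at hR
                        | cons b restR =>
                          rw [EL] at hL; rw [ER] at hR
                          simp only [List.head?_cons, Option.some.injEq] at hL hR
                          show a.2.2 = b.2.2
                          rw [hL, hR]

-- B's string-level min fold equals the triple-level first-minimal fold
theorem foldB (main L : List Char) :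
    ∀ (t : List String) (h : String),
      t.foldl (fun best gh =>
          if pvLt3 (pvPriority main L gh) (pvPriority main L best) then gh else best) h
        = ((t.map pvParse).foldl (fT main L) (pvParse h)).2.2 := by
  intro t
  induction t with
  | nil => intro h; exact (parse_full h).symm
  | cons x t ih =>
    intro h
    rw [List.map_cons, List.foldl_cons, List.foldl_cons, ih]
    have hstep : pvParse (if pvLt3 (pvPriority main L x) (pvPriority main L h) then x else h)
        = fT main L (pvParse h) (pvParse x) := by
      unfold fT
      rw [← priority_eq_keyT, ← priority_eq_keyT]
      by_cases c : pvLt3 (pvPriority main L x) (pvPriority main L h) = true <;> simp [c]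
    rw [hstep]

-- ===== VERDICT (by name: the statement is the Claim_ definition above) =====
theorem match_github_version_py_spec : Claim_equal_match_github_version_py := by
  intro gv lo ghs _
  unfold Spec_match_github_version_py
  cases ghs with
  | nil => rfl
  | cons h t =>
    calc match_github_version_py gv lo (h :: t)
        = Achain (pvGetMain gv.toList) lo.toList (pvParse h :: t.map pvParse) := rfl
      _ = ((t.map pvParse).foldl (fT (pvGetMain gv.toList) lo.toList) (pvParse h)).2.2 :=
          chain_eq _ _ _ _
      _ = t.foldl (fun best gh =>
            if pvLt3 (pvPriority (pvGetMain gv.toList) lo.toList gh)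
                (pvPriority (pvGetMain gv.toList) lo.toList best) then gh else best) h :=
          (foldB _ _ t h).symm
      _ = match_github_version_py_alt gv lo (h :: t) := rfl
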